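-- pv_equiv track=rewrite | github.com/octaprog7/libRTC | sensor_pack_2/irtc.py | change_bit_by_flags
-- ===== SOURCE A (Python) =====
-- def get_bit_mask_gen(bit_numbers: tuple[int,...], flags: tuple[[int, bool],...]):
--     """Возвращает генератор битовых маск для битовых операций.
--     bit_numbers - кортеж с номерами битов, которые соответствуют в int элементам flags"""
--     # возвращает маску для бита по его номеру. Если флаг равен 1, то создается маска для операции OR,
--     # иначе создается маска для операции AND
--     _get_mask = lambda idx: 1 << bit_numbers[idx] if flags[idx] else ~(1 << bit_numbers[idx])
--     # индексы для кортежа флагов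
--     flag_index = range(len(bit_numbers))
--     # пропускаю флаги содержащие None
--     bit_mask_gen = (_get_mask(index) for index in flag_index if not flags[index] is None)
--     return bit_mask_gen
--
-- def change_bit_by_flags(source: int, bit_numbers: [range, tuple[int,...]], flags: tuple[[int, bool],...]) -> int:
--     """Изменяет биты с номерами bit_numbers в source в соответствии со значениями флагов flags.
--     Возвращает результат, как int"""
--     bit_mask_gen = get_bit_mask_gen(bit_numbers, flags)
--     _src = source
--     for mask in bit_mask_gen:
--         if mask < 0:
--             _src &= mask  # обнуляю бит
--         else:
--             _src |= mask  # устанавливаю бит в 1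
--     return _src
-- ===== SOURCE B (Python) =====
-- def change_bit_by_flags(source: int, bit_numbers, flags) -> int:
--     """Same task, different decomposition: build a per-bit last-write-wins table
--     (bit number -> desired value), then apply each distinct bit once."""
--     table = {}
--     for index in range(len(bit_numbers)):
--         flag = flags[index]
--         if flag is not None:
--             table[bit_numbers[index]] = bool(flag)
--     result = source
--     for bit, flag in table.items():
--         if flag:
--             result |= 1 << bit
--         else:
--             result &= ~(1 << bit)
--     return result
-- ===== Notes on version B (the rewrite author's own statement) =====
-- stated objective: alternative
-- what changed: Replaces the sign-encoded mask generator (OR-mask for set, negative AND-mask for clear, dispatched on mask sign) with a per-bit last-write-wins dict built in one pass, then one bitwise update per distinct bit.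
import Mathlib
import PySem

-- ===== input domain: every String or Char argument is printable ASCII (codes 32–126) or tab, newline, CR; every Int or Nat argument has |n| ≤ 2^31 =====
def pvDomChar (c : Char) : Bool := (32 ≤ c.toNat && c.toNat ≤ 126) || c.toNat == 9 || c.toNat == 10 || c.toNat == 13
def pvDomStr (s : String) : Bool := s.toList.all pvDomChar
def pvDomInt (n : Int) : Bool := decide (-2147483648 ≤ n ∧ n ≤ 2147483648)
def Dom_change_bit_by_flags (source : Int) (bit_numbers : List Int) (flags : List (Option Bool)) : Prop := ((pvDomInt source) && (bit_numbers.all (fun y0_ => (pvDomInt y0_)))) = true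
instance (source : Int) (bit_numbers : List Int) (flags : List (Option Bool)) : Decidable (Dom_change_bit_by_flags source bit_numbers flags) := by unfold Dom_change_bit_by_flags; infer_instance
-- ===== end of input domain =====

-- B replaces A's sign-encoded mask generator + sign-dispatch loop with a per-bit
-- last-write-wins dict followed by one bitwise update per distinct bit (alternative decomposition).


-- ===== PORT A =====
-- `1 << b` is ported as (1 : Int) <<< b.toNat, `~m` as Int.not, `|`/`&` as PySem.Int.bor/band,
-- and `flags[index]`/`bit_numbers[index]` via PySem.List.pyGet?; Pre_ excludes the inputs where
-- Python raises (short flags → IndexError, negative shift count → ValueError), so .toNat/.getD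
-- never actually clamp/default under Pre_.
def get_bit_mask_gen (bit_numbers : List Int) (flags : List (Option Bool)) : List Int :=
  (List.range bit_numbers.length).filterMap (fun (index : Nat) =>
    match PySem.List.pyGet? flags (index : Int) with
    | some (some flag) =>
        some (if flag then (1 : Int) <<< ((PySem.List.pyGet? bit_numbers (index : Int)).getD 0).toNat
              else Int.not ((1 : Int) <<< ((PySem.List.pyGet? bit_numbers (index : Int)).getD 0).toNat))
    | _ => none)

def change_bit_by_flags (source : Int) (bit_numbers : List Int) (flags : List (Option Bool)) : Int :=
  (get_bit_mask_gen bit_numbers flags).foldl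
    (fun _src mask => if mask < 0 then PySem.Int.band _src mask else PySem.Int.bor _src mask)
    source

-- ===== PORT B =====
def change_bit_by_flags_alt (source : Int) (bit_numbers : List Int) (flags : List (Option Bool)) : Int :=
  let table : PySem.Dict Int Bool :=
    (List.range bit_numbers.length).foldl (fun table (index : Nat) =>
      match PySem.List.pyGet? flags (index : Int) with
      | some (some flag) =>
          table.insert ((PySem.List.pyGet? bit_numbers (index : Int)).getD 0) flag
      | _ => table) PySem.Dict.empty
  table.items.foldl (fun result bf =>
    if bf.2 then PySem.Int.bor result ((1 : Int) <<< bf.1.toNat)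
    else PySem.Int.band result (Int.not ((1 : Int) <<< bf.1.toNat))) source

-- ===== PRECONDITION & SPEC =====
-- Pre_ excludes exactly the inputs where Python A raises: flags shorter than bit_numbers
-- (IndexError at flags[index]) and a negative bit number whose flag is not None
-- (ValueError at 1 << bit). A returns normally on every other input.
def Pre_change_bit_by_flags (source : Int) (bit_numbers : List Int) (flags : List (Option Bool)) : Prop :=
  bit_numbers.length ≤ flags.length ∧
  ∀ i : Nat, i < bit_numbers.length → flags.getD i none ≠ none → 0 ≤ bit_numbers.getD i 0

instance (source : Int) (bit_numbers : List Int) (flags : List (Option Bool)) : Decidable (Pre_change_bit_by_flags source bit_numbers flags) := by unfold Pre_change_bit_by_flags; infer_instance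

def pvWitness_change_bit_by_flags : Int × List Int × List (Option Bool) :=
  (5, [1, 3, 1], [some true, none, some false])

def Spec_change_bit_by_flags (source : Int) (bit_numbers : List Int) (flags : List (Option Bool)) (out : Int) : Prop := out = change_bit_by_flags_alt source bit_numbers flags
instance (source : Int) (bit_numbers : List Int) (flags : List (Option Bool)) (out : Int) : Decidable (Spec_change_bit_by_flags source bit_numbers flags out) := by unfold Spec_change_bit_by_flags; infer_instance

-- ===== CLAIM (what is proved, stated in full; the proofs are below) =====
def Claim_equal_change_bit_by_flags : Prop := ∀ (source : Int) (bit_numbers : List Int) (flags : List (Option Bool)), Dom_change_bit_by_flags source bit_numbers flags → Pre_change_bit_by_flags source bit_numbers flags → Spec_change_bit_by_flags source bit_numbers flags (change_bit_by_flags source bit_numbers flags)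

-- ===== LEMMAS AND PROOFS =====

-- The single update both programs perform for one (bit, flag) pair.
def pvApply (r : Int) (p : Int × Bool) : Int :=
  if p.2 then PySem.Int.bor r ((1 : Int) <<< p.1.toNat)
  else PySem.Int.band r (Int.not ((1 : Int) <<< p.1.toNat))

-- The common (bit, flag) stream both programs consume, in order.
def pvPairs (bit_numbers : List Int) (flags : List (Option Bool)) : List (Int × Bool) :=
  (List.range bit_numbers.length).filterMap (fun (index : Nat) =>
    match PySem.List.pyGet? flags (index : Int) with
    | some (some flag) => some (((PySem.List.pyGet? bit_numbers (index : Int)).getD 0), flag)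
    | _ => none)

-- ---------- Nat/Int bit-level toolkit ----------

lemma pvClearEqLdiff (x N : Nat) : x - (x &&& N) = Nat.ldiff x N := by
  induction x using Nat.binaryRec generalizing N with
  | zero => simp [Nat.ldiff]
  | bit b m ih =>
    have hN : Nat.bit (N.testBit 0) (N / 2) = N := by
      have h := Nat.bit_testBit_zero_shiftRight_one N
      rwa [Nat.shiftRight_one] at h
    rw [← hN, Nat.land_bit, Nat.ldiff_bit]
    have h1 : m &&& (N / 2) ≤ m := Nat.and_le_left
    have h2 := ih (N / 2)
    simp only [Nat.bit_val]
    cases b <;> cases hb : N.testBit 0 <;> simp [Bool.toNat] <;> omega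

lemma pvTestBitClear (x N k : Nat) :
    (x - (x &&& N)).testBit k = (x.testBit k && !N.testBit k) := by
  rw [pvClearEqLdiff, Nat.testBit_ldiff]

lemma pvIntExt (x y : Int) (h : ∀ k, x.testBit k = y.testBit k) : x = y := by
  cases x with
  | ofNat m =>
    cases y with
    | ofNat n =>
      have : m = n := Nat.eq_of_testBit_eq (fun i => by simpa [Int.testBit] using h i)
      simp [this]
    | negSucc n =>
      exfalso
      have hk := h (m + n + 1)
      have hm : m.testBit (m + n + 1) = false :=
        Nat.testBit_eq_false_of_lt (lt_of_lt_of_le Nat.lt_two_pow_self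
          (Nat.pow_le_pow_right (by norm_num) (by omega)))
      have hn : n.testBit (m + n + 1) = false :=
        Nat.testBit_eq_false_of_lt (lt_of_lt_of_le Nat.lt_two_pow_self
          (Nat.pow_le_pow_right (by norm_num) (by omega)))
      simp [Int.testBit, hm, hn] at hk
  | negSucc m =>
    cases y with
    | ofNat n =>
      exfalso
      have hk := h (m + n + 1)
      have hm : m.testBit (m + n + 1) = false :=
        Nat.testBit_eq_false_of_lt (lt_of_lt_of_le Nat.lt_two_pow_self
          (Nat.pow_le_pow_right (by norm_num) (by omega)))
      have hn : n.testBit (m + n + 1) = false :=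
        Nat.testBit_eq_false_of_lt (lt_of_lt_of_le Nat.lt_two_pow_self
          (Nat.pow_le_pow_right (by norm_num) (by omega)))
      simp [Int.testBit, hm, hn] at hk
    | negSucc n =>
      have : m = n := Nat.eq_of_testBit_eq (fun i => by
        have := h i; simp [Int.testBit] at this; exact this)
      simp [this]

lemma pvShiftOne (n : Nat) : (1 : Int) <<< n = Int.ofNat (2 ^ n) := by
  show Int.shiftLeft (Int.ofNat 1) n = Int.ofNat (2 ^ n)
  simp [Int.shiftLeft, Nat.shiftLeft_eq]

lemma pvTestBitApply (r : Int) (b : Int) (f : Bool) (k : Nat) :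
    (pvApply r (b, f)).testBit k = if k = b.toNat then f else r.testBit k := by
  have hofN : ∀ m : Nat, (Int.ofNat m).toNat = m := fun m => rfl
  have hnegS : ∀ m : Nat, (-(Int.negSucc m) - 1).toNat = m := by
    intro m; rw [Int.negSucc_eq]; simp
  have hneglt : ∀ m : Nat, ¬ (0 : Int) ≤ Int.negSucc m := by
    intro m; rw [Int.negSucc_eq]; have := Int.natCast_nonneg m; omega
  have hpos : ∀ m : Nat, (0 : Int) ≤ Int.ofNat m := fun m => Int.natCast_nonneg m
  have hnegform : ∀ m : Nat, -((m : Nat) : Int) - 1 = Int.negSucc m := by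
    intro m; rw [Int.negSucc_eq]; ring
  unfold pvApply
  rw [pvShiftOne]
  cases f with
  | true =>
    cases r with
    | ofNat p =>
      show (PySem.Int.bor (Int.ofNat p) (Int.ofNat (2 ^ b.toNat))).testBit k = _
      simp only [PySem.Int.bor, if_pos (hpos p), if_pos (hpos (2 ^ b.toNat)), hofN]
      show (Int.ofNat (p ||| 2 ^ b.toNat)).testBit k = _
      simp only [Int.testBit, Nat.testBit_lor, Nat.testBit_two_pow]
      rcases eq_or_ne k b.toNat with h | h <;> simp [h, eq_comm]
    | negSucc q =>
      show (PySem.Int.bor (Int.negSucc q) (Int.ofNat (2 ^ b.toNat))).testBit k = _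
      simp only [PySem.Int.bor, if_neg (hneglt q), if_pos (hpos (2 ^ b.toNat)), hnegS, hofN]
      rw [hnegform]
      simp only [Int.testBit, pvTestBitClear, Nat.testBit_two_pow]
      rcases eq_or_ne k b.toNat with h | h <;> simp [h, eq_comm]
  | false =>
    have hnot : Int.not (Int.ofNat (2 ^ b.toNat)) = Int.negSucc (2 ^ b.toNat) := rfl
    rw [hnot]
    cases r with
    | ofNat p =>
      show (PySem.Int.band (Int.ofNat p) (Int.negSucc (2 ^ b.toNat))).testBit k = _
      simp only [PySem.Int.band, if_pos (hpos p), if_neg (hneglt (2 ^ b.toNat)), hnegS, hofN]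
      simp only [Int.testBit, pvTestBitClear, Nat.testBit_two_pow]
      rcases eq_or_ne k b.toNat with h | h <;> simp [h, eq_comm]
    | negSucc q =>
      show (PySem.Int.band (Int.negSucc q) (Int.negSucc (2 ^ b.toNat))).testBit k = _
      simp only [PySem.Int.band, if_neg (hneglt q), if_neg (hneglt (2 ^ b.toNat)), hnegS]
      rw [hnegform]
      simp only [Int.testBit, Nat.testBit_lor, Nat.testBit_two_pow]
      rcases eq_or_ne k b.toNat with h | h <;> simp [h, eq_comm]

lemma pvApplyAbsorb (r : Int) (b : Int) (v f : Bool) :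
    pvApply (pvApply r (b, v)) (b, f) = pvApply r (b, f) := by
  apply pvIntExt
  intro k
  simp only [pvTestBitApply]
  split_ifs <;> rfl

lemma pvApplyComm (r : Int) (b k : Int) (f v : Bool)
    (hb : 0 ≤ b) (hk : 0 ≤ k) (hne : b ≠ k) :
    pvApply (pvApply r (k, v)) (b, f) = pvApply (pvApply r (b, f)) (k, v) := by
  have htn : b.toNat ≠ k.toNat := by omega
  apply pvIntExt
  intro j
  simp only [pvTestBitApply]
  rcases eq_or_ne j b.toNat with h1 | h1 <;> rcases eq_or_ne j k.toNat with h2 | h2 <;>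
    simp [h1, h2] at htn ⊢ <;> omega

lemma pvMaskNeg (n : Nat) : Int.not ((1 : Int) <<< n) < 0 := by
  rw [pvShiftOne]
  show Int.negSucc (2 ^ n) < 0
  rw [Int.negSucc_eq]
  have := Int.natCast_nonneg (2 ^ n)
  omega

lemma pvMaskPos (n : Nat) : ¬ ((1 : Int) <<< n < 0) := by
  rw [pvShiftOne]
  have := Int.natCast_nonneg (2 ^ n)
  simp only [Int.ofNat_eq_natCast]
  omega

-- ---------- fold-level lemmas ----------

lemma pvPull (l : List (Int × Bool)) (b : Int) (f : Bool) (x : Int)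
    (hb : 0 ≤ b) (hall : ∀ p ∈ l, 0 ≤ p.1) (hnb : b ∉ l.map Prod.fst) :
    l.foldl pvApply (pvApply x (b, f)) = pvApply (l.foldl pvApply x) (b, f) := by
  induction l generalizing x with
  | nil => rfl
  | cons p tl ih =>
    simp only [List.map_cons, List.mem_cons, not_or] at hnb
    have hp : pvApply (pvApply x (b, f)) p = pvApply (pvApply x p) (b, f) := by
      rcases p with ⟨pb, pf⟩
      exact pvApplyComm x pb b pf f (hall (pb, pf) (by simp)) hb
        (fun h => hnb.1 h.symm)
    simp only [List.foldl_cons]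
    rw [hp]
    exact ih (pvApply x p) (fun q hq => hall q (by simp [hq])) hnb.2

lemma pvSubstFold (l : List (Int × Bool)) (b : Int) (f : Bool) (s : Int)
    (hnd : (l.map Prod.fst).Nodup) (hb : 0 ≤ b) (hall : ∀ p ∈ l, 0 ≤ p.1)
    (hmem : b ∈ l.map Prod.fst) :
    (l.map (fun p => if p.1 == b then (b, f) else p)).foldl pvApply s =
      pvApply (l.foldl pvApply s) (b, f) := by
  induction l generalizing s with
  | nil => simp at hmem
  | cons p tl ih =>
    simp only [List.map_cons, List.nodup_cons] at hnd
    have halltl : ∀ q ∈ tl, 0 ≤ q.1 := fun q hq => hall q (by simp [hq])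
    rcases eq_or_ne p.1 b with hpb | hpb
    · have hnb : b ∉ tl.map Prod.fst := fun hmem' => hnd.1 (hpb ▸ hmem')
      have hsub : tl.map (fun p => if p.1 == b then (b, f) else p) = tl := by
        refine (List.map_congr_left ?_).trans (List.map_id tl)
        intro q hq
        have hqb : q.1 ≠ b := fun h => hnb (h ▸ List.mem_map_of_mem hq)
        simp [hqb]
      have hhead : (if p.1 == b then (b, f) else p) = (b, f) := by simp [hpb]
      have hps : pvApply s p = pvApply s (b, p.2) := by
        rcases p with ⟨pb, pf⟩; simp only at hpb; rw [hpb]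
      calc (List.map (fun p => if p.1 == b then (b, f) else p) (p :: tl)).foldl pvApply s
          = tl.foldl pvApply (pvApply s (b, f)) := by
            simp only [List.map_cons, hhead, hsub, List.foldl_cons]
        _ = pvApply (tl.foldl pvApply s) (b, f) := pvPull tl b f s hb halltl hnb
        _ = pvApply (pvApply (tl.foldl pvApply s) (b, p.2)) (b, f) :=
            (pvApplyAbsorb (tl.foldl pvApply s) b p.2 f).symm
        _ = pvApply (tl.foldl pvApply (pvApply s (b, p.2))) (b, f) := by
            rw [pvPull tl b p.2 s hb halltl hnb]
        _ = pvApply ((p :: tl).foldl pvApply s) (b, f) := by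
            simp only [List.foldl_cons, hps]
    · have hmemtl : b ∈ tl.map Prod.fst := by
        rcases List.mem_cons.mp hmem with h | h
        · exact absurd h.symm hpb
        · exact h
      have hheq : (if p.1 == b then (b, f) else p) = p := by simp [hpb]
      simp only [List.map_cons, List.foldl_cons, hheq]
      exact ih (pvApply s p) hnd.2 halltl hmemtl

lemma pvInsertFold (d : PySem.Dict Int Bool) (b : Int) (f : Bool) (s : Int)
    (hnd : d.keys.Nodup) (hk : ∀ k ∈ d.keys, 0 ≤ k) (hb : 0 ≤ b) :
    (d.insert b f).items.foldl pvApply s = pvApply (d.items.foldl pvApply s) (b, f) := by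
  have hkeys : d.keys = d.items.map Prod.fst := rfl
  have hall : ∀ p ∈ d.items, 0 ≤ p.1 := by
    intro p hp
    exact hk p.1 (by rw [hkeys]; exact List.mem_map_of_mem hp)
  by_cases hc : d.contains b = true
  · rw [PySem.Dict.items_insert_of_contains d f hc]
    exact pvSubstFold d.items b f s (hkeys ▸ hnd) hb hall
      (by rw [← hkeys]; exact (PySem.Dict.contains_iff_mem_keys d b).mp hc)
  · rw [PySem.Dict.items_insert_of_not_contains d f (by simpa using hc)]
    simp [List.foldl_append, pvApply]

lemma pvDictFold (L : List (Int × Bool)) (d : PySem.Dict Int Bool) (s : Int)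
    (hnd : d.keys.Nodup) (hk : ∀ k ∈ d.keys, 0 ≤ k) (hL : ∀ p ∈ L, 0 ≤ p.1) :
    ((L.foldl (fun d p => d.insert p.1 p.2) d).items).foldl pvApply s =
      L.foldl pvApply (d.items.foldl pvApply s) := by
  induction L generalizing d s with
  | nil => rfl
  | cons p tl ih =>
    have hb : 0 ≤ p.1 := hL p (by simp)
    simp only [List.foldl_cons]
    rw [ih (d.insert p.1 p.2) s (PySem.Dict.nodup_keys_insert d p.1 p.2 hnd)
      (by
        intro k hkmem
        rcases (PySem.Dict.mem_keys_insert d p.1 k p.2).mp hkmem with h | h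
        · exact h ▸ hb
        · exact hk k h)
      (fun q hq => hL q (by simp [hq]))]
    rw [pvInsertFold d p.1 p.2 s hnd hk hb]

lemma pvAEq (source : Int) (bit_numbers : List Int) (flags : List (Option Bool)) :
    change_bit_by_flags source bit_numbers flags =
      (pvPairs bit_numbers flags).foldl pvApply source := by
  unfold change_bit_by_flags get_bit_mask_gen pvPairs
  have hmap : (List.range bit_numbers.length).filterMap (fun (index : Nat) =>
      match PySem.List.pyGet? flags (index : Int) with
      | some (some flag) =>
          some (if flag then (1 : Int) <<< ((PySem.List.pyGet? bit_numbers (index : Int)).getD 0).toNat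
                else Int.not ((1 : Int) <<< ((PySem.List.pyGet? bit_numbers (index : Int)).getD 0).toNat))
      | _ => none) =
    ((List.range bit_numbers.length).filterMap (fun (index : Nat) =>
      match PySem.List.pyGet? flags (index : Int) with
      | some (some flag) => some (((PySem.List.pyGet? bit_numbers (index : Int)).getD 0), flag)
      | _ => none)).map (fun p =>
        if p.2 then (1 : Int) <<< p.1.toNat else Int.not ((1 : Int) <<< p.1.toNat)) := by
    rw [List.map_filterMap]
    apply List.filterMap_congr
    intro i _
    rcases PySem.List.pyGet? flags (i : Int) with _ | (_ | f) <;> simp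
  rw [hmap, List.foldl_map]
  congr 1
  funext s p
  rcases p with ⟨b, f⟩
  cases f
  · simp only [pvApply, if_neg (by simp : ¬ (false = true)), if_pos (pvMaskNeg b.toNat)]
  · simp only [if_true, pvApply]
    rw [if_neg (pvMaskPos b.toNat)]

lemma pvTableEq (bit_numbers : List Int) (flags : List (Option Bool)) (l : List Nat)
    (d : PySem.Dict Int Bool) :
    l.foldl (fun table (index : Nat) =>
      match PySem.List.pyGet? flags (index : Int) with
      | some (some flag) =>
          table.insert ((PySem.List.pyGet? bit_numbers (index : Int)).getD 0) flag
      | _ => table) d =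
    (l.filterMap (fun (index : Nat) =>
      match PySem.List.pyGet? flags (index : Int) with
      | some (some flag) => some (((PySem.List.pyGet? bit_numbers (index : Int)).getD 0), flag)
      | _ => none)).foldl (fun d p => d.insert p.1 p.2) d := by
  induction l generalizing d with
  | nil => rfl
  | cons i tl ih =>
    simp only [List.foldl_cons, List.filterMap_cons]
    rcases h : PySem.List.pyGet? flags (i : Int) with _ | f
    · exact ih d
    · rcases f with _ | f
      · exact ih d
      · simp only [List.foldl_cons]
        exact ih _

lemma pvBEq (source : Int) (bit_numbers : List Int) (flags : List (Option Bool))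
    (hL : ∀ p ∈ pvPairs bit_numbers flags, 0 ≤ p.1) :
    change_bit_by_flags_alt source bit_numbers flags =
      (pvPairs bit_numbers flags).foldl pvApply source := by
  unfold change_bit_by_flags_alt
  rw [pvTableEq bit_numbers flags]
  have hfold := pvDictFold (pvPairs bit_numbers flags) PySem.Dict.empty source
    (by simp [PySem.Dict.keys_empty])
    (by simp [PySem.Dict.keys_empty]) hL
  simpa [pvPairs, pvApply, PySem.Dict.items, PySem.Dict.empty] using hfold

lemma pvPairsNonneg (source : Int) (bit_numbers : List Int) (flags : List (Option Bool))
    (hpre : Pre_change_bit_by_flags source bit_numbers flags) :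
    ∀ p ∈ pvPairs bit_numbers flags, 0 ≤ p.1 := by
  intro p hp
  unfold pvPairs at hp
  rw [List.mem_filterMap] at hp
  obtain ⟨i, hi, heq⟩ := hp
  rw [List.mem_range] at hi
  rcases h : PySem.List.pyGet? flags (i : Int) with _ | f
  · rw [h] at heq; simp at heq
  · rcases f with _ | f
    · rw [h] at heq; simp at heq
    · rw [h] at heq
      simp only [Option.some.injEq] at heq
      rw [PySem.List.pyGet?_natCast] at h
      have hflag : flags.getD i none ≠ none := by
        rw [List.getD_eq_getElem?_getD, h]
        simp
      have hnn := hpre.2 i hi hflag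
      rw [List.getD_eq_getElem?_getD, List.getElem?_eq_getElem hi] at hnn
      rw [← heq]
      simp only [PySem.List.pyGet?_natCast, List.getElem?_eq_getElem hi]
      simpa using hnn

-- ===== VERDICT (by name: the statement is the Claim_ definition above) =====
theorem change_bit_by_flags_spec : Claim_equal_change_bit_by_flags := by
  intro source bit_numbers flags _hdom hpre
  unfold Spec_change_bit_by_flags
  rw [pvAEq, pvBEq source bit_numbers flags (pvPairsNonneg source bit_numbers flags hpre)]
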